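-- pv_equiv track=rewrite | github.com/WhateverMars/project-Euler | 6-square-sum-difference.py | square_sum_diff
-- ===== SOURCE A (Python) =====
-- def square_sum_diff(max):
--     sum_of_squares = 0
--     squares_of_sum = 0
--
--     # square each value first and then add to the total sum
--     for i in range(1, max + 1):
--         sum_of_squares += i**2
--
--     # sum all the numbers first and then square the result
--     sum = 0
--     for i in range(1, max + 1):
--         sum += i
--
--     squares_of_sum = sum**2
--
--     # find the difference
--     square_sum_diff = squares_of_sum - sum_of_squares
--     return square_sum_diff
-- ===== SOURCE B (Python) =====
-- def square_sum_diff(max):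
--     s = max * (max + 1) // 2
--     return s * s - max * (max + 1) * (2 * max + 1) // 6
-- ===== Notes on version B (the rewrite author's own statement) =====
-- stated objective: faster
-- what changed: Replaces the two linear summation loops with the closed-form Gauss formulas for the triangular and pyramidal sums.
-- outside the precondition, e.g. on square_sum_diff(-2): A returns 0, B returns 2
import Mathlib
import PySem

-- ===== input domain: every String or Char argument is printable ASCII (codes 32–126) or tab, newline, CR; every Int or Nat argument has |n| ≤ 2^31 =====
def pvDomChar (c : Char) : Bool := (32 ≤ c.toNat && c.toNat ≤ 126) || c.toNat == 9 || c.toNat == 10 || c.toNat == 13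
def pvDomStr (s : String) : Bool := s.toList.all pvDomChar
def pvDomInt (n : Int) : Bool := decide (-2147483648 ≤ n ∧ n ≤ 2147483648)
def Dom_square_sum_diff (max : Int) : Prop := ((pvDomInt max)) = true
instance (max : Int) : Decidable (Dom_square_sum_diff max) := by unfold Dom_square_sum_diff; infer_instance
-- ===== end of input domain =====

-- B replaces A's two O(n) summation loops with the closed-form Gauss formulas (O(1)).

-- ===== PORT A =====
def square_sum_diff (max : Int) : Int :=
  let sum_of_squares := (PySem.List.pyRange 1 (max + 1) 1).foldl (fun acc i => acc + i ^ 2) 0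
  let sum := (PySem.List.pyRange 1 (max + 1) 1).foldl (fun acc i => acc + i) 0
  let squares_of_sum := sum ^ 2
  squares_of_sum - sum_of_squares

-- ===== PORT B =====
def square_sum_diff_alt (max : Int) : Int :=
  let s := PySem.Int.floordiv (max * (max + 1)) 2
  s * s - PySem.Int.floordiv (max * (max + 1) * (2 * max + 1)) 6

-- ===== PRECONDITION & SPEC =====
-- Pre_ restricts to the problem's natural domain of nonnegative max: for negative max A's empty
-- loops return zero while the closed form need not, and negative bounds are outside the task's meaning.
def Pre_square_sum_diff (max : Int) : Prop := 0 ≤ max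
instance (max : Int) : Decidable (Pre_square_sum_diff max) := by unfold Pre_square_sum_diff; infer_instance
def pvWitness_square_sum_diff : Int := 10

def Spec_square_sum_diff (max : Int) (out : Int) : Prop := out = square_sum_diff_alt max
instance (max : Int) (out : Int) : Decidable (Spec_square_sum_diff max out) := by unfold Spec_square_sum_diff; infer_instance

-- ===== CLAIM (what is proved, stated in full; the proofs are below) =====
def Claim_equal_square_sum_diff : Prop := ∀ (max : Int), Dom_square_sum_diff max → Pre_square_sum_diff max → Spec_square_sum_diff max (square_sum_diff max)

-- ===== LEMMAS AND PROOFS =====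

theorem pv_sum_mul_two (n : Nat) :
    ((PySem.List.pyRange 1 ((n : Int) + 1) 1).foldl (fun acc i => acc + i) 0) * 2
      = (n : Int) * ((n : Int) + 1) := by
  induction n with
  | zero => decide
  | succ k ih =>
      have h : PySem.List.pyRange 1 ((k : Int) + 1 + 1) 1
          = PySem.List.pyRange 1 ((k : Int) + 1) 1 ++ [(k : Int) + 1] :=
        PySem.List.pyRange_one_succ_right (by omega)
      push_cast
      rw [h, List.foldl_append]
      simp only [List.foldl]
      nlinarith [ih]

theorem pv_sumsq_mul_six (n : Nat) :
    ((PySem.List.pyRange 1 ((n : Int) + 1) 1).foldl (fun acc i => acc + i ^ 2) 0) * 6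
      = (n : Int) * ((n : Int) + 1) * (2 * (n : Int) + 1) := by
  induction n with
  | zero => decide
  | succ k ih =>
      have h : PySem.List.pyRange 1 ((k : Int) + 1 + 1) 1
          = PySem.List.pyRange 1 ((k : Int) + 1) 1 ++ [(k : Int) + 1] :=
        PySem.List.pyRange_one_succ_right (by omega)
      push_cast
      rw [h, List.foldl_append]
      simp only [List.foldl]
      nlinarith [ih]

-- ===== VERDICT (by name: the statement is the Claim_ definition above) =====
theorem square_sum_diff_spec : Claim_equal_square_sum_diff := by
  intro max _ hpre
  unfold Spec_square_sum_diff square_sum_diff square_sum_diff_alt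
  obtain ⟨n, rfl⟩ := Int.eq_ofNat_of_zero_le hpre
  have hs := pv_sum_mul_two n
  have hq := pv_sumsq_mul_six n
  set S := (PySem.List.pyRange 1 ((n : Int) + 1) 1).foldl (fun acc i => acc + i) 0 with hS
  set Q := (PySem.List.pyRange 1 ((n : Int) + 1) 1).foldl (fun acc i => acc + i ^ 2) 0 with hQ
  have h2 : PySem.Int.floordiv ((n : Int) * ((n : Int) + 1)) 2 = S := by
    rw [PySem.Int.floordiv_eq_ediv_of_pos (by norm_num), ← hs]
    omega
  have h6 : PySem.Int.floordiv ((n : Int) * ((n : Int) + 1) * (2 * (n : Int) + 1)) 6 = Q := by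
    rw [PySem.Int.floordiv_eq_ediv_of_pos (by norm_num), ← hq]
    omega
  simp only [h2, h6]
  ring
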